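-- pv_equiv track=rewrite | github.com/lassumpcao1976/uai-engine-monorepo | apps/runner/main.py | _extract_build_output
-- ===== SOURCE A (Python) =====
-- def _extract_build_output(logs: str) -> str:
--     """Extract build output from build logs"""
--     lines = logs.split("\n")
--     build_lines = []
--     in_build = False
--     for line in lines:
--         if "build" in line.lower() and ("next build" in line.lower() or "npm run build" in line.lower()):
--             in_build = True
--         if in_build:
--             build_lines.append(line)
--     return "\n".join(build_lines)
-- ===== SOURCE B (Python) =====
-- def _extract_build_output(logs: str) -> str:
--     """Extract build output from build logs"""
--     lines = logs.split("\n")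
--     for i, line in enumerate(lines):
--         low = line.lower()
--         if "next build" in low or "npm run build" in low:
--             return "\n".join(lines[i:])
--     return ""
-- ===== Notes on version B (the rewrite author's own statement) =====
-- stated objective: simpler
-- what changed: Replaces the stateful in_build flag plus per-line accumulator with find-first-matching-line-then-join-the-tail, and drops the redundant extra substring pre-test that both trigger phrases already imply.
import Mathlib
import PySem

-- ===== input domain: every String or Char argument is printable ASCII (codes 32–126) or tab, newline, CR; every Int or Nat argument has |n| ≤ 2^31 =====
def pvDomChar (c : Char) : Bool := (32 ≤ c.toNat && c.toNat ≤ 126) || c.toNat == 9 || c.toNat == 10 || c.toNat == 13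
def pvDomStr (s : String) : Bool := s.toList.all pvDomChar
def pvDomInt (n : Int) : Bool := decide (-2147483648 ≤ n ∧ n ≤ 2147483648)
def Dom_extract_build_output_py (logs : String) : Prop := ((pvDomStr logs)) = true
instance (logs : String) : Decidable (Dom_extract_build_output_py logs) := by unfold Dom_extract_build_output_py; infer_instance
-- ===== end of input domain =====

-- B replaces A's stateful in_build flag + per-line accumulator by find-first-matching-line-then-join-tail (objective: simpler).

-- ===== PORT A =====
def pvStepA (st : Bool × List String) (line : String) : Bool × List String :=
  let in_build :=
    if PySem.Str.isIn "build" (PySem.Str.lower line) &&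
        (PySem.Str.isIn "next build" (PySem.Str.lower line) ||
         PySem.Str.isIn "npm run build" (PySem.Str.lower line)) then true else st.1
  (in_build, if in_build then st.2 ++ [line] else st.2)

-- logs.split("\n"): sep is the nonempty literal "\n", so split? is always `some`
def extract_build_output_py (logs : String) : String :=
  let lines := (PySem.Str.split? logs "\n").getD []
  let res := lines.foldl pvStepA (false, [])
  PySem.Str.join "\n" res.2

-- ===== PORT B =====
def pvLoopB : List String → String
  | [] => ""
  | line :: rest =>
    let low := PySem.Str.lower line
    if PySem.Str.isIn "next build" low || PySem.Str.isIn "npm run build" low then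
      PySem.Str.join "\n" (line :: rest)
    else
      pvLoopB rest

-- logs.split("\n"): sep is the nonempty literal "\n", so split? is always `some`
def extract_build_output_py_alt (logs : String) : String :=
  pvLoopB ((PySem.Str.split? logs "\n").getD [])

-- ===== PRECONDITION & SPEC =====
def Spec_extract_build_output_py (logs : String) (out : String) : Prop := out = extract_build_output_py_alt logs
instance (logs : String) (out : String) : Decidable (Spec_extract_build_output_py logs out) := by unfold Spec_extract_build_output_py; infer_instance

-- ===== CLAIM (what is proved, stated in full; the proofs are below) =====
def Claim_equal_extract_build_output_py : Prop := ∀ (logs : String), Dom_extract_build_output_py logs → Spec_extract_build_output_py logs (extract_build_output_py logs)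

-- ===== LEMMAS AND PROOFS =====

-- the tail of the line list from the first matching line on
def pvMatchTail : List String → List String
  | [] => []
  | line :: rest =>
    if PySem.Str.isIn "next build" (PySem.Str.lower line) ||
       PySem.Str.isIn "npm run build" (PySem.Str.lower line) then
      line :: rest
    else pvMatchTail rest

-- A's redundant «"build" in line.lower()» conjunct never changes the test
lemma pvCondA_eq_condB (line : String) :
    (PySem.Str.isIn "build" (PySem.Str.lower line) &&
      (PySem.Str.isIn "next build" (PySem.Str.lower line) ||
       PySem.Str.isIn "npm run build" (PySem.Str.lower line)))
    = (PySem.Str.isIn "next build" (PySem.Str.lower line) ||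
       PySem.Str.isIn "npm run build" (PySem.Str.lower line)) := by
  by_cases h : (PySem.Str.isIn "next build" (PySem.Str.lower line) ||
      PySem.Str.isIn "npm run build" (PySem.Str.lower line)) = true
  · rw [h, Bool.and_true]
    rcases Bool.or_eq_true_iff.mp h with h' | h' <;>
    · rw [PySem.Str.isIn_iff_infix] at h' ⊢
      exact List.IsInfix.trans (by decide) h'
  · simp [Bool.not_eq_true] at h
    simp [h]

lemma pvFoldA_true (l : List String) (acc : List String) :
    l.foldl pvStepA (true, acc) = (true, acc ++ l) := by
  induction l generalizing acc with
  | nil => simp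
  | cons h t ih =>
    simp only [List.foldl_cons, pvStepA]
    split <;> simp [ih]

lemma pvFoldA_false (l : List String) (acc : List String) :
    (l.foldl pvStepA (false, acc)).2 = acc ++ pvMatchTail l := by
  induction l generalizing acc with
  | nil => simp [pvMatchTail]
  | cons h t ih =>
    simp only [List.foldl_cons, pvStepA, pvCondA_eq_condB, pvMatchTail]
    cases hc : (PySem.Str.isIn "next build" (PySem.Str.lower h) ||
        PySem.Str.isIn "npm run build" (PySem.Str.lower h)) with
    | true => simp [pvFoldA_true]
    | false => simpa using ih acc

lemma pvLoopB_eq_matchTail (l : List String) :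
    pvLoopB l = PySem.Str.join "\n" (pvMatchTail l) := by
  induction l with
  | nil => simp [pvLoopB, pvMatchTail, PySem.Str.join]
  | cons h t ih =>
    simp only [pvLoopB, pvMatchTail]
    split <;> simp_all

-- ===== VERDICT (by name: the statement is the Claim_ definition above) =====
theorem extract_build_output_py_spec : Claim_equal_extract_build_output_py := by
  intro logs _
  unfold Spec_extract_build_output_py
  simp only [extract_build_output_py, extract_build_output_py_alt, pvFoldA_false,
    pvLoopB_eq_matchTail, List.nil_append]
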